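-- pv_equiv track=rewrite | github.com/harshithere/programming-challenges | number_bomb.py | contains_bomb
-- ===== SOURCE A (Python) =====
-- def  contains_bomb( arr):
--     counter = 0    # Net checker to see if 3 pairs are reached
--     count = 1      # Counting instances of each integer
--     for i in range (1,len(arr)):
--         if (arr[i] == arr[i-1]):
--             count = count+1
--         else :
--             # Condition to check if the previous integer had more than 2 instances
--             if count>=2:
--                   counter = counter+1
--                   if counter == 3:
--                     return True
--
--             else:
--                 counter = 0
--             count = 1
--             # Condition to check if the new integer and previous are consecutive
--             if arr[i]!=arr[i-1]+1:
--                 counter = 0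
--
--     if count>=2:
--       counter =counter+1
--     if counter == 3:
--             return True
--     return False
-- ===== SOURCE B (Python) =====
-- def contains_bomb(arr):
--     # Run-length encode the array, then scan runs with a chain counter.
--     runs = []
--     if arr:
--         cur, cnt = arr[0], 1
--         for v in arr[1:]:
--             if v == cur:
--                 cnt += 1
--             else:
--                 runs.append((cur, cnt))
--                 cur, cnt = v, 1
--         runs.append((cur, cnt))
--     counter = 0
--     for i, (v, n) in enumerate(runs):
--         if n >= 2:
--             counter += 1
--             if counter == 3:
--                 return True
--         else:
--             counter = 0
--         if i + 1 < len(runs) and runs[i + 1][0] != v + 1: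
--             counter = 0
--     return False
-- ===== Notes on version B (the rewrite author's own statement) =====
-- stated objective: alternative
-- what changed: Replaces A's interleaved per-element scan (tracking count/counter with in-loop resets) by first run-length encoding the array into (value,length) runs, then a separate pass over runs maintaining the chain counter with a lookahead continuity check.
import Mathlib
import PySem

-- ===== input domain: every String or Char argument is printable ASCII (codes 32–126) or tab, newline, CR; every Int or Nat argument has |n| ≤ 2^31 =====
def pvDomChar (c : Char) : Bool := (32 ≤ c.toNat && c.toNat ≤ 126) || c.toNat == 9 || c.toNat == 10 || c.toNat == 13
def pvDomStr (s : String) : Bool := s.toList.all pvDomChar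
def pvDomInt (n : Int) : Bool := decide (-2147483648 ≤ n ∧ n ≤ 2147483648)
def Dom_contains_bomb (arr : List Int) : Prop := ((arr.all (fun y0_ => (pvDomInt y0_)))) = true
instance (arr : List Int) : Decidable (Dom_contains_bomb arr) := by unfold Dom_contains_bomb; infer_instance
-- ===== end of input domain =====

-- B run-length encodes the array and scans the runs with a chain counter; same O(n) cost, different structure.

-- ===== PORT A =====
-- the code after A's loop: if count>=2: counter+=1; return counter==3
def finA (counter count : Int) : Bool :=
  decide ((if count ≥ 2 then counter + 1 else counter) = 3)

-- A's loop over i in range(1, len(arr)): prev = arr[i-1], the list argument is arr[i:]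
def loopA : Int → Int → Int → List Int → Bool
  | _, counter, count, [] => finA counter count
  | prev, counter, count, x :: xs =>
    if x = prev then loopA x counter (count + 1) xs
    else
      if count ≥ 2 then
        let counter := counter + 1
        if counter = 3 then true
        else
          let counter := if x ≠ prev + 1 then 0 else counter
          loopA x counter 1 xs
      else
        let counter : Int := 0
        let counter := if x ≠ prev + 1 then 0 else counter
        loopA x counter 1 xs

def contains_bomb (arr : List Int) : Bool :=
  match arr with
  | [] => finA 0 1          -- the loop body never runs
  | a :: rest => loopA a 0 1 rest

-- ===== PORT B =====
-- B's first loop: run-length encoding (cur/cnt state, current run emitted at each change and at the end)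
def runsFrom : Int → Int → List Int → List (Int × Int)
  | cur, cnt, [] => [(cur, cnt)]
  | cur, cnt, v :: vs => if v = cur then runsFrom cur (cnt + 1) vs else (cur, cnt) :: runsFrom v 1 vs

def rle (arr : List Int) : List (Int × Int) :=
  match arr with
  | [] => []
  | a :: rest => runsFrom a 1 rest

-- B's second loop over runs: chain counter, lookahead at the next run's value
def loopB : Int → List (Int × Int) → Bool
  | _, [] => false
  | counter, (v, n) :: rest =>
    let counter := if n ≥ 2 then counter + 1 else 0
    if n ≥ 2 ∧ counter = 3 then true
    else
      let counter :=
        match rest with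
        | (v2, _) :: _ => if v2 ≠ v + 1 then 0 else counter
        | [] => counter
      loopB counter rest

def contains_bomb_alt (arr : List Int) : Bool :=
  loopB 0 (rle arr)

-- ===== PRECONDITION & SPEC =====
def Spec_contains_bomb (arr : List Int) (out : Bool) : Prop := out = contains_bomb_alt arr
instance (arr : List Int) (out : Bool) : Decidable (Spec_contains_bomb arr out) := by unfold Spec_contains_bomb; infer_instance

-- ===== CLAIM (what is proved, stated in full; the proofs are below) =====
def Claim_equal_contains_bomb : Prop := ∀ (arr : List Int), Dom_contains_bomb arr → Spec_contains_bomb arr (contains_bomb arr)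

-- ===== LEMMAS AND PROOFS =====

-- the first run emitted by runsFrom carries the current value
theorem runsFrom_head (xs : List Int) : ∀ cur cnt, ∃ n r, runsFrom cur cnt xs = (cur, n) :: r := by
  induction xs with
  | nil => intro cur cnt; exact ⟨cnt, [], rfl⟩
  | cons v vs ih =>
    intro cur cnt
    by_cases h : v = cur
    · subst h
      obtain ⟨n, r, hr⟩ := ih v (cnt + 1)
      exact ⟨n, r, by simp [runsFrom, hr]⟩
    · exact ⟨cnt, runsFrom v 1 vs, by simp [runsFrom, h]⟩

-- A's scan from state (prev, counter, count) equals B's run scan on the runs of the unread suffix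
theorem loopA_eq_loopB (rest : List Int) :
    ∀ prev counter count, 0 ≤ counter → counter ≤ 2 →
      loopA prev counter count rest = loopB counter (runsFrom prev count rest) := by
  induction rest with
  | nil =>
    intro prev counter count _ h2
    simp only [loopA, runsFrom, loopB, finA]
    by_cases hc : count ≥ 2
    · by_cases h3 : counter + 1 = 3 <;> simp [hc, h3]
    · have : counter ≠ 3 := by omega
      simp [hc, this]
  | cons x xs ih =>
    intro prev counter count h1 h2
    by_cases hx : x = prev
    · subst hx
      simp only [loopA, runsFrom]
      exact ih x counter (count + 1) h1 h2
    · obtain ⟨n, r, hr⟩ := runsFrom_head xs x 1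
      simp only [loopA, runsFrom, if_neg hx, hr, loopB]
      by_cases hc : count ≥ 2
      · by_cases h3 : counter + 1 = 3
        · simp [hc, h3]
        · have hf : ¬ (count ≥ 2 ∧ counter + 1 = 3) := fun h => h3 h.2
          by_cases hnc : x ≠ prev + 1
          · simp only [if_pos hc, if_neg h3, if_pos hnc, if_neg hf]
            rw [ih x 0 1 le_rfl (by omega), hr]
            simp [loopB]
          · simp only [if_pos hc, if_neg h3, if_neg hnc, if_neg hf]
            rw [ih x (counter + 1) 1 (by omega) (by omega), hr]
            simp [loopB]
      · have hf : ¬ (count ≥ 2 ∧ (0 : Int) = 3) := fun h => hc h.1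
        by_cases hnc : x ≠ prev + 1
        · simp only [if_neg hc, if_pos hnc, if_neg hf]
          rw [ih x 0 1 le_rfl (by omega), hr]
          simp [loopB]
        · simp only [if_neg hc, if_neg hnc, if_neg hf]
          rw [ih x 0 1 le_rfl (by omega), hr]
          simp [loopB]

-- ===== VERDICT (by name: the statement is the Claim_ definition above) =====
theorem contains_bomb_spec : Claim_equal_contains_bomb := by
  intro arr _
  unfold Spec_contains_bomb contains_bomb contains_bomb_alt rle
  match arr with
  | [] => decide
  | a :: rest => exact loopA_eq_loopB rest a 0 1 le_rfl (by omega)
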